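-- pv_equiv track=rewrite | github.com/xiebing77/xquant | utils/tools.py | get_more_step
-- ===== SOURCE A (Python) =====
-- def get_more_step(arr, c=2):
--     i = -1
--     while i >= -len(arr)+c:
--         if min(arr[i-c:i]) > arr[i]:
--             break
--         i -= 1
--
--     if i == -1:
--         return 0
--
--     return -1-i
-- ===== SOURCE B (Python) =====
-- def get_more_step(arr, c=2):
--     n = len(arr)
--     if n <= c:
--         return 0
--     # maintain m = min of the sliding window arr[p-c:p] incrementally while
--     # scanning p from the end; recompute only when the leaving element was the min
--     m = min(arr[n - 1 - c:n - 1])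
--     for p in range(n - 1, c - 1, -1):
--         if m > arr[p]:
--             return n - 1 - p
--         if p > c:
--             if arr[p - 1] == m:
--                 m = min(arr[p - 1 - c:p - 1])
--             else:
--                 m = min(m, arr[p - 1 - c])
--     return n - c
-- ===== Notes on version B (the rewrite author's own statement) =====
-- stated objective: alternative
-- what changed: Instead of rebuilding the window slice and calling min() at every step, B computes the window minimum once and maintains it incrementally while sliding toward the front, recomputing only when the leaving element was the minimum.
-- outside the precondition, e.g. on get_more_step([2, 4, -3], -1): A returns 0, B raises ValueError; on get_more_step([0, -2, 1], -2): A returns 1, B raises ValueError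
import Mathlib
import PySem

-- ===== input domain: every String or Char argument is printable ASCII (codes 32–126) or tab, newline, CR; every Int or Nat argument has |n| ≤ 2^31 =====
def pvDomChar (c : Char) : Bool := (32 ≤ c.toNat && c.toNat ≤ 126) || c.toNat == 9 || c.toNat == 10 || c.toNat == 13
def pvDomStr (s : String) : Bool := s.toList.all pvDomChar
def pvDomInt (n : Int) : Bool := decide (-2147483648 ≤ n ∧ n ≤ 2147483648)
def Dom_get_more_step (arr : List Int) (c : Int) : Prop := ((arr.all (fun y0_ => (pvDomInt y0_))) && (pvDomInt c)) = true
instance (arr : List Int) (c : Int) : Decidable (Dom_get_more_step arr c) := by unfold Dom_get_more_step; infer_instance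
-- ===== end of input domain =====

-- B maintains the sliding-window minimum incrementally (recomputing only when the
-- leaving element was the minimum) instead of re-slicing and calling min each step.


-- ===== PORT A =====
-- min(xs): Python raises ValueError on the empty list; that case is excluded by Pre_, 0 is a junk default
def pyMinD (xs : List Int) : Int := (PySem.List.min? xs (fun x => x)).getD 0

-- the while loop of A: returns the final value of i (break value or first i failing the guard)
def aWhile (arr : List Int) (c : Int) (i : Int) : Int :=
  if h : -(arr.length : Int) + c ≤ i then
    if pyMinD (PySem.List.slice arr (some (i - c)) (some i)) > PySem.List.pyGetD arr i 0 then i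
    else aWhile arr c (i - 1)
  else i
termination_by (i + (arr.length : Int) - c + 1).toNat
decreasing_by omega

def get_more_step (arr : List Int) (c : Int) : Int :=
  let i := aWhile arr c (-1)
  if i = -1 then 0 else -1 - i

-- ===== PORT B =====
-- the for-loop of Source B over range(n-1, c-1, -1), carrying the incremental window minimum m
def bGo (arr : List Int) (c : Int) (n : Int) (m : Int) : List Int → Int
  | [] => n - c
  | p :: ps =>
    if m > PySem.List.pyGetD arr p 0 then n - 1 - p
    else bGo arr c n
      (if c < p then
        (if PySem.List.pyGetD arr (p - 1) 0 = m
         then pyMinD (PySem.List.slice arr (some (p - 1 - c)) (some (p - 1)))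
         else min m (PySem.List.pyGetD arr (p - 1 - c) 0))
       else m) ps

def get_more_step_alt (arr : List Int) (c : Int) : Int :=
  let n : Int := arr.length
  if n ≤ c then 0
  else bGo arr c n (pyMinD (PySem.List.slice arr (some (n - 1 - c)) (some (n - 1))))
         (PySem.List.pyRange (n - 1) (c - 1) (-1))

-- ===== PRECONDITION & SPEC =====
-- Pre_ excludes exactly the inputs on which A's loop body runs with c ≤ 0: there A's
-- mixed-sign slice arr[i-c:i] either makes min of an empty slice raise ValueError or accidentally yields
-- a window of the wrong shape and an accidental value, while B raises ValueError on its
-- own initial slice.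
def Pre_get_more_step (arr : List Int) (c : Int) : Prop := 1 ≤ c ∨ (arr = [] ∧ 0 ≤ c)
instance (arr : List Int) (c : Int) : Decidable (Pre_get_more_step arr c) := by
  unfold Pre_get_more_step; infer_instance

def pvWitness_get_more_step : List Int × Int := ([3, 1, 4, 1, 5], 2)

def Spec_get_more_step (arr : List Int) (c : Int) (out : Int) : Prop := out = get_more_step_alt arr c
instance (arr : List Int) (c : Int) (out : Int) : Decidable (Spec_get_more_step arr c out) := by
  unfold Spec_get_more_step; infer_instance

-- ===== CLAIM (what is proved, stated in full; the proofs are below) =====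
def Claim_equal_get_more_step : Prop := ∀ (arr : List Int) (c : Int), Dom_get_more_step arr c → Pre_get_more_step arr c → Spec_get_more_step arr c (get_more_step arr c)

-- ===== LEMMAS AND PROOFS =====

-- the common window arr[p-c:p], as take/drop on Nat indices
def win (arr : List Int) (c' : Nat) (p : Nat) : List Int :=
  List.take c' (List.drop (p - c') arr)

theorem win_ne_nil (arr : List Int) (c' p : Nat) (hc : 1 ≤ c') (hp : c' ≤ p)
    (hpn : p ≤ arr.length) : win arr c' p ≠ [] := by
  have : (win arr c' p).length = min c' (arr.length - (p - c')) := by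
    simp [win]
  intro h
  rw [h] at this
  simp at this
  omega

theorem mem_win (arr : List Int) (c' p : Nat) (x : Int) (hp : c' ≤ p) :
    x ∈ win arr c' p ↔ ∃ j : Nat, p - c' ≤ j ∧ j < p ∧ arr[j]? = some x := by
  constructor
  · intro hx
    rw [List.mem_iff_getElem?] at hx
    obtain ⟨i, hi⟩ := hx
    have hlt : i < c' := by
      by_contra hge
      rw [List.getElem?_eq_none] at hi
      · simp at hi
      · have := List.length_take_le c' (List.drop (p - c') arr)
        simp [win]
        omega
    refine ⟨p - c' + i, by omega, by omega, ?_⟩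
    rw [win, List.getElem?_take, if_pos hlt, List.getElem?_drop] at hi
    exact hi
  · rintro ⟨j, hj1, hj2, hj3⟩
    rw [List.mem_iff_getElem?]
    refine ⟨j - (p - c'), ?_⟩
    rw [win, List.getElem?_take, if_pos (by omega), List.getElem?_drop]
    have : p - c' + (j - (p - c')) = j := by omega
    rw [this]; exact hj3

-- characterisation of pyMinD on a nonempty list
theorem pyMinD_mem (xs : List Int) (h : xs ≠ []) : pyMinD xs ∈ xs := by
  rcases hm : PySem.List.min? xs (fun x => x) with _ | m
  · rw [PySem.List.min?_eq_none_iff] at hm; exact absurd hm h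
  · have := PySem.List.min?_mem hm
    simpa [pyMinD, hm] using this

theorem pyMinD_le (xs : List Int) (h : xs ≠ []) : ∀ y ∈ xs, pyMinD xs ≤ y := by
  rcases hm : PySem.List.min? xs (fun x => x) with _ | m
  · rw [PySem.List.min?_eq_none_iff] at hm; exact absurd hm h
  · have := PySem.List.min?_isMin hm
    simpa [pyMinD, hm] using this

theorem pyMinD_eq (xs : List Int) (v : Int) (h1 : v ∈ xs) (h2 : ∀ y ∈ xs, v ≤ y) :
    pyMinD xs = v := by
  have hne : xs ≠ [] := by intro h; subst h; simp at h1
  exact le_antisymm (pyMinD_le xs hne v h1) (h2 _ (pyMinD_mem xs hne))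

-- slice arr (p - c) p with nonnegative Nat endpoints is win
theorem slice_win_nonneg (arr : List Int) (c' q : Nat) (a b : Int)
    (ha : a = (q : Int) - (c' : Int)) (hb : b = (q : Int)) (hq : c' ≤ q) :
    PySem.List.slice arr (some a) (some b) = win arr c' q := by
  subst ha hb
  have h2 : ((q : Int) - (c' : Int)).toNat = q - c' := by omega
  have h1 : ((q : Int)).toNat - ((q : Int) - (c' : Int)).toNat = c' := by omega
  rw [PySem.List.slice_toNat arr (by omega) (by omega), h1, h2, win]

-- A's slice arr[i-c : i] with both endpoints negative, i = p - n
theorem slice_win_neg (arr : List Int) (c' q : Nat) (a b : Int)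
    (ha : a = (q : Int) - (arr.length : Int) - (c' : Int)) (hb : b = (q : Int) - (arr.length : Int))
    (hc : 1 ≤ c') (hq : c' ≤ q) (hqn : q < arr.length) :
    PySem.List.slice arr (some a) (some b) = win arr c' q := by
  subst ha hb
  simp only [PySem.List.slice, PySem.List.clampIdx, win]
  rw [if_pos (by omega), if_neg (by omega), if_pos (by omega), if_neg (by omega)]
  have h2 : ((arr.length : Int) + ((q : Int) - (arr.length : Int) - (c' : Int))).toNat = q - c' := by omega
  have h1 : ((arr.length : Int) + ((q : Int) - (arr.length : Int))).toNat
      - ((arr.length : Int) + ((q : Int) - (arr.length : Int) - (c' : Int))).toNat = c' := by omega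
  rw [h1, h2]

-- the sliding step: if the leaving element arr[p-1] is not the minimum of the window
-- ending at p, the minimum of the window ending at p-1 is min (old min) (entering element)
theorem shift_min (arr : List Int) (c' p : Nat) (hc : 1 ≤ c') (hp : c' + 1 ≤ p)
    (hpn : p ≤ arr.length) (hne : arr.getD (p - 1) 0 ≠ pyMinD (win arr c' p)) :
    pyMinD (win arr c' (p - 1)) = min (pyMinD (win arr c' p)) (arr.getD (p - 1 - c') 0) := by
  set m := pyMinD (win arr c' p) with hm
  have hWne : win arr c' p ≠ [] := win_ne_nil arr c' p hc (by omega) hpn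
  have hW'ne : win arr c' (p - 1) ≠ [] := win_ne_nil arr c' (p - 1) hc (by omega) (by omega)
  -- m is attained at some index j ≤ p - 2 (not at p-1, by hne)
  obtain ⟨j, hj1, hj2, hj3⟩ := (mem_win arr c' p m (by omega)).1 (pyMinD_mem _ hWne)
  have hjn : j < arr.length := by
    have := List.getElem?_eq_some_iff.1 hj3; omega
  have hjne : j ≠ p - 1 := by
    intro h; subst h
    apply hne
    rw [List.getD_eq_getElem arr 0 (by omega)]
    have := hj3
    rw [List.getElem?_eq_getElem (by omega)] at this
    exact (Option.some_injective _ this).symm ▸ rfl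
  -- entering element is in the new window
  have henter : arr.getD (p - 1 - c') 0 ∈ win arr c' (p - 1) := by
    rw [mem_win arr c' (p - 1) _ (by omega)]
    refine ⟨p - 1 - c', by omega, by omega, ?_⟩
    rw [List.getD_eq_getElem arr 0 (by omega), List.getElem?_eq_getElem (by omega)]
  -- m is in the new window too (attained at j ∈ [p-1-c', p-2])
  have hmold : m ∈ win arr c' (p - 1) := by
    rw [mem_win arr c' (p - 1) _ (by omega)]
    exact ⟨j, by omega, by omega, hj3⟩
  apply pyMinD_eq
  · -- min m (entering) is in the new window
    rcases le_total m (arr.getD (p - 1 - c') 0) with h | h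
    · rw [min_eq_left h]; exact hmold
    · rw [min_eq_right h]; exact henter
  · intro y hy
    obtain ⟨k, hk1, hk2, hk3⟩ := (mem_win arr c' (p - 1) y (by omega)).1 hy
    by_cases hk : k = p - 1 - c'
    · subst hk
      have : y = arr.getD (p - 1 - c') 0 := by
        rw [List.getD_eq_getElem arr 0 (by omega)]
        rw [List.getElem?_eq_getElem (by omega)] at hk3
        exact (Option.some_injective _ hk3).symm
      subst this
      exact min_le_right _ _
    · -- k ∈ [p-c', p-2] ⊆ old window
      have : y ∈ win arr c' p := by
        rw [mem_win arr c' p _ (by omega)]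
        exact ⟨k, by omega, by omega, hk3⟩
      exact le_trans (min_le_left _ _) (pyMinD_le _ hWne y this)

-- pyGetD with index p (cast) and with index p - n (negative) both read arr[p]
theorem pyGetD_pos (arr : List Int) (p : Nat) (i : Int) (hi : i = (p : Int))
    (hp : p < arr.length) : PySem.List.pyGetD arr i 0 = arr.getD p 0 := by
  subst hi
  rw [PySem.List.pyGetD_eq_getElem arr 0 (by omega) (by omega)]
  rw [List.getD_eq_getElem arr 0 (by omega)]
  simp

theorem pyGetD_neg (arr : List Int) (p : Nat) (i : Int)
    (hi : i = (p : Int) - (arr.length : Int)) (hp : p < arr.length) :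
    PySem.List.pyGetD arr i 0 = arr.getD p 0 := by
  have hk : i = -((arr.length - p : Nat) : Int) := by subst hi; omega
  rw [hk, PySem.List.pyGetD_neg_natCast arr (arr.length - p) 0 (by omega) (by omega)]
  rw [List.getD_eq_getElem arr 0 (by omega)]
  congr 1; omega

-- main loop correspondence: starting at position p with the correct window minimum,
-- B's loop computes -1 - (A's final i)
theorem main_loop (arr : List Int) (c' : Nat) (hc : 1 ≤ c') :
    ∀ (d p : Nat), p = c' + d → p < arr.length → ∀ m : Int, m = pyMinD (win arr c' p) →
      bGo arr (c' : Int) (arr.length : Int) m (PySem.List.pyRange (p : Int) ((c' : Int) - 1) (-1))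
        = -1 - aWhile arr (c' : Int) ((p : Int) - (arr.length : Int)) := by
  intro d
  induction d with
  | zero =>
    intro p hp hpn m hm
    subst hm
    rw [PySem.List.pyRange_neg_one_cons (by omega), bGo]
    rw [aWhile, dif_pos (by omega)]
    rw [slice_win_neg arr c' p ((p : Int) - (arr.length : Int) - (c' : Int))
        ((p : Int) - (arr.length : Int)) rfl rfl hc (by omega) hpn]
    rw [pyGetD_neg arr p ((p : Int) - (arr.length : Int)) rfl hpn]
    rw [pyGetD_pos arr p (p : Int) rfl hpn]
    by_cases ht : pyMinD (win arr c' p) > arr.getD p 0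
    · rw [if_pos ht, if_pos ht]; omega
    · rw [if_neg ht, if_neg ht, if_neg (by omega : ¬ ((c' : Int) < (p : Int)))]
      rw [PySem.List.pyRange_neg_one_eq_nil (by omega), bGo]
      rw [aWhile, dif_neg (by omega)]
      omega
  | succ d ih =>
    intro p hp hpn m hm
    subst hm
    rw [PySem.List.pyRange_neg_one_cons (by omega), bGo]
    rw [aWhile, dif_pos (by omega)]
    rw [slice_win_neg arr c' p ((p : Int) - (arr.length : Int) - (c' : Int))
        ((p : Int) - (arr.length : Int)) rfl rfl hc (by omega) hpn]
    rw [pyGetD_neg arr p ((p : Int) - (arr.length : Int)) rfl hpn]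
    rw [pyGetD_pos arr p (p : Int) rfl hpn]
    by_cases ht : pyMinD (win arr c' p) > arr.getD p 0
    · rw [if_pos ht, if_pos ht]; omega
    · rw [if_neg ht, if_neg ht, if_pos (by omega : ((c' : Int) < (p : Int)))]
      rw [pyGetD_pos arr (p - 1) ((p : Int) - 1) (by omega) (by omega)]
      rw [pyGetD_pos arr (p - 1 - c') ((p : Int) - 1 - (c' : Int)) (by omega) (by omega)]
      have hm' : (if arr.getD (p - 1) 0 = pyMinD (win arr c' p)
           then pyMinD (PySem.List.slice arr (some ((p : Int) - 1 - (c' : Int))) (some ((p : Int) - 1)))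
           else min (pyMinD (win arr c' p)) (arr.getD (p - 1 - c') 0))
          = pyMinD (win arr c' (p - 1)) := by
        by_cases he : arr.getD (p - 1) 0 = pyMinD (win arr c' p)
        · rw [if_pos he, slice_win_nonneg arr c' (p - 1) ((p : Int) - 1 - (c' : Int))
              ((p : Int) - 1) (by omega) (by omega) (by omega)]
        · rw [if_neg he, shift_min arr c' p hc (by omega) (by omega) he]
      rw [hm']
      have e1 : (p : Int) - 1 = ((p - 1 : Nat) : Int) := by omega
      have e2 : (p : Int) - (arr.length : Int) - 1 = ((p - 1 : Nat) : Int) - (arr.length : Int) := by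
        omega
      rw [e1, e2]
      exact ih (p - 1) (by omega) (by omega) _ rfl

-- A's post-processing is just -1 - i (0 = -1 - (-1))
theorem get_more_step_eq (arr : List Int) (c : Int) :
    get_more_step arr c = -1 - aWhile arr c (-1) := by
  rw [get_more_step]
  by_cases h : aWhile arr c (-1) = -1
  · simp [h]
  · simp [h]

-- ===== VERDICT (by name: the statement is the Claim_ definition above) =====
theorem get_more_step_spec : Claim_equal_get_more_step := by
  intro arr c _ hpre
  unfold Spec_get_more_step
  rcases hpre with hc | ⟨hnil, hc0⟩
  · -- c ≥ 1
    by_cases hlen : (arr.length : Int) ≤ c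
    · -- array too short: both return 0
      rw [get_more_step_eq, aWhile, dif_neg (by omega)]
      simp [get_more_step_alt, hlen]
    · -- main case: n ≥ c + 1
      have hc' : c = ((c.toNat : Nat) : Int) := by omega
      have hn : c.toNat < arr.length := by omega
      rw [get_more_step_eq]
      simp only [get_more_step_alt, if_neg hlen]
      rw [slice_win_nonneg arr c.toNat (arr.length - 1) ((arr.length : Int) - 1 - c)
          ((arr.length : Int) - 1) (by omega) (by omega) (by omega)]
      have e1 : (arr.length : Int) - 1 = (((arr.length - 1 : Nat)) : Int) := by omega
      rw [hc'] at hlen ⊢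
      simp only [Int.toNat_natCast]
      rw [e1]
      have := main_loop arr c.toNat (by omega) (arr.length - 1 - c.toNat) (arr.length - 1)
        (by omega) (by omega) (pyMinD (win arr c.toNat (arr.length - 1))) rfl
      rw [this]
      have e2 : (((arr.length - 1 : Nat)) : Int) - (arr.length : Int) = -1 := by omega
      rw [e2]
  · -- empty array, c ≥ 0: both return 0
    subst hnil
    rw [get_more_step_eq, aWhile, dif_neg (by simp; omega)]
    simp [get_more_step_alt, hc0]
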